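-- pv_equiv track=rewrite | github.com/VivaRado/variomatic | lib/revisional/sample/main_rep.py | get_line_multi_ct_aggregate
-- ===== SOURCE A (Python) =====
-- import itertools as it
--
-- def get_line_multi_ct_aggregate(l_p,l_c,l_a):
-- 	#
-- 	s = [l_p, l_c, l_a]
-- 	#
-- 	s_i = [[0,1,2], [0,1,2], [0,1,2]]
-- 	#
-- 	perm = list(it.product(*s))
-- 	perm_i = list(it.product(*s_i))
-- 	#
-- 	#
-- 	results = []
-- 	#
-- 	for p in perm:
-- 		#
-- 		unique_data = set(x for l in p for x in l)
-- 		#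
-- 		result = []
-- 		#
-- 		for x in unique_data:
-- 			#
-- 			total = -1
-- 			#
-- 			z = 0
-- 			#
-- 			for y in p:
-- 				#
-- 				if x in y:
-- 					#
-- 					total = total + 1
-- 					#
-- 				#
-- 				z = z + 1
-- 				#
--
-- 				#
-- 			#
-- 			#
-- 			result.append(total)
-- 			#
-- 		#
-- 		results.append(result)
-- 		#
-- 	#
-- 	#
-- 	sum_results = []
-- 	#
-- 	o = 0
-- 	#
-- 	for u in results:
-- 		#
-- 		sum_results.append([o,sum(u),perm_i[o], sum(perm_i[o])])
-- 		#
-- 		o = o + 1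
-- 		#
-- 	#
-- 	sorted_sum_results = sorted(sum_results, key = lambda x: x[1] - sum(x[2]), reverse=True)
-- 	#
-- 	item = perm[sorted_sum_results[0][0]]
-- 	#
-- 	#
-- 	return item
-- ===== SOURCE B (Python) =====
-- # Single-pass argmax over the cartesian product: no results/sum_results tables,
-- # no sort; perm_i sums replaced by the closed form i//9 + (i//3)%3 + i%3.
-- def get_line_multi_ct_aggregate(l_p, l_c, l_a):
-- 	i = 0
-- 	best = None  # (score, item)
-- 	for a in l_p:
-- 		for b in l_c:
-- 			for c in l_a:
-- 				uniq = set(a + b + c)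
-- 				score = sum((x in a) + (x in b) + (x in c) - 1 for x in uniq)
-- 				score -= i // 9 + (i // 3) % 3 + i % 3
-- 				if best is None or score > best[0]:
-- 					best = (score, (a, b, c))
-- 				i += 1
-- 	return best[1]
-- ===== Notes on version B (the rewrite author's own statement) =====
-- stated objective: simpler
-- what changed: Replaced A's results/sum_results tables plus stable reverse sort with a single strict-greater argmax pass over the product, computing the perm_i sum by the closed form i//9 + (i//3)%3 + i%3.
import Mathlib
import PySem

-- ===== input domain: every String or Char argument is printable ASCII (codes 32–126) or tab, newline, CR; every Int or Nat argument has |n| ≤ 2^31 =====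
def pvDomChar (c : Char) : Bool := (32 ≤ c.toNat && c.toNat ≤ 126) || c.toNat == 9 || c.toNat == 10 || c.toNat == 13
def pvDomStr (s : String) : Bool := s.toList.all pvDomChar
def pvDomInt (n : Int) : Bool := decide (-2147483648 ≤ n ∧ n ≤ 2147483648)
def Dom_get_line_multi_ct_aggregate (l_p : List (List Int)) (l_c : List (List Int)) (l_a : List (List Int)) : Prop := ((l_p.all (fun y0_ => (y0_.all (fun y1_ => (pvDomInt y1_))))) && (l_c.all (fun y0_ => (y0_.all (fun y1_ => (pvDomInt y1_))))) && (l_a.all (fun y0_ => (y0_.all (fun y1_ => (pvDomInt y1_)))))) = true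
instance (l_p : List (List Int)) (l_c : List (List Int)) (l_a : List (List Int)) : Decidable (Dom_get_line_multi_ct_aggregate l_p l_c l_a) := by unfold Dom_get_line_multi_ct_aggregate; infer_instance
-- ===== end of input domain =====

-- B replaces A's results/sum_results tables and the stable reverse sort by a single
-- strict-greater argmax pass over the product, with perm_i sums as the closed form
-- i//9 + (i//3)%3 + i%3 (objective: simpler; equal value proved on Pre_).

-- ===== PORT A =====
-- list(it.product(*s_i)) with s_i = [[0,1,2]]*3
def pvPermI : List (List Int) :=
  [0, 1, 2].flatMap (fun a => [0, 1, 2].flatMap (fun b => ([0, 1, 2] : List Int).map (fun c => [a, b, c])))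

-- list(it.product(l_p, l_c, l_a)) — each tuple ported as a 3-element list
def pvProdA (l_p : List (List Int)) (l_c : List (List Int)) (l_a : List (List Int)) : List (List (List Int)) :=
  l_p.flatMap (fun a => l_c.flatMap (fun b => l_a.map (fun c => [a, b, c])))

-- the inner 'for x in unique_data' body: total starts at -1, z is the dead counter
def pvResultA (p : List (List Int)) : List Int :=
  (PySem.Set.ofList (p.flatMap id)).foldl
    (fun result x =>
      result ++ [(p.foldl (fun (tz : Int × Int) y =>
        ((if x ∈ y then tz.1 + 1 else tz.1), tz.2 + 1)) (-1, 0)).1]) []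

def get_line_multi_ct_aggregate (l_p : List (List Int)) (l_c : List (List Int)) (l_a : List (List Int)) : List (List Int) :=
  let perm := pvProdA l_p l_c l_a
  let perm_i := pvPermI
  let results := perm.foldl (fun results p => results ++ [pvResultA p]) []
  let sum_results := (results.foldl
    (fun (st : List (Int × Int × List Int × Int) × Int) u =>
      (st.1 ++ [(st.2, u.sum, PySem.List.pyGetD perm_i st.2 [], (PySem.List.pyGetD perm_i st.2 []).sum)], st.2 + 1))
    ([], 0)).1
  let sorted_sum_results := PySem.List.sorted sum_results (fun x => x.2.1 - x.2.2.1.sum) true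
  PySem.List.pyGetD perm (PySem.List.pyGetD sorted_sum_results 0 (0, 0, [], 0)).1 []

-- ===== PORT B =====
-- score of the permutation (a,b,c) at index i
def pvScoreB (a b c : List Int) (i : Int) : Int :=
  ((PySem.Set.ofList (a ++ b ++ c)).map
      (fun x => (if x ∈ a then (1 : Int) else 0) + (if x ∈ b then 1 else 0) + (if x ∈ c then 1 else 0) - 1)).sum
    - (PySem.Int.floordiv i 9 + PySem.Int.mod (PySem.Int.floordiv i 3) 3 + PySem.Int.mod i 3)

def get_line_multi_ct_aggregate_alt (l_p : List (List Int)) (l_c : List (List Int)) (l_a : List (List Int)) : List (List Int) :=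
  let r := l_p.foldl (fun st a =>
    l_c.foldl (fun st b =>
      l_a.foldl (fun (st : Int × Option (Int × List (List Int))) c =>
        let score := pvScoreB a b c st.1
        match st.2 with
        | none => (st.1 + 1, some (score, [a, b, c]))
        | some (bs, bi) => (st.1 + 1, if bs < score then some (score, [a, b, c]) else some (bs, bi)))
        st) st) ((0 : Int), (none : Option (Int × List (List Int))))
  match r.2 with
  | some (_, item) => item
  | none => []  -- Python B raises TypeError here (best is None); outside Pre_

-- ===== PRECONDITION & SPEC =====
-- Pre_ excludes exactly the inputs where A raises: an empty factor (perm is empty,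
-- sorted_sum_results[0] IndexError) or a product longer than 27 (perm_i[o] IndexError).
def Pre_get_line_multi_ct_aggregate (l_p : List (List Int)) (l_c : List (List Int)) (l_a : List (List Int)) : Prop :=
  l_p ≠ [] ∧ l_c ≠ [] ∧ l_a ≠ [] ∧ l_p.length * l_c.length * l_a.length ≤ 27
instance (l_p : List (List Int)) (l_c : List (List Int)) (l_a : List (List Int)) : Decidable (Pre_get_line_multi_ct_aggregate l_p l_c l_a) := by unfold Pre_get_line_multi_ct_aggregate; infer_instance

def pvWitness_get_line_multi_ct_aggregate : List (List Int) × List (List Int) × List (List Int) :=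
  ([[1, 2]], [[2, 3]], [[3, 4], [1, 2]])

def Spec_get_line_multi_ct_aggregate (l_p : List (List Int)) (l_c : List (List Int)) (l_a : List (List Int)) (out : List (List Int)) : Prop := out = get_line_multi_ct_aggregate_alt l_p l_c l_a
instance (l_p : List (List Int)) (l_c : List (List Int)) (l_a : List (List Int)) (out : List (List Int)) : Decidable (Spec_get_line_multi_ct_aggregate l_p l_c l_a out) := by unfold Spec_get_line_multi_ct_aggregate; infer_instance

-- ===== CLAIM (what is proved, stated in full; the proofs are below) =====
def Claim_equal_get_line_multi_ct_aggregate : Prop := ∀ (l_p : List (List Int)) (l_c : List (List Int)) (l_a : List (List Int)), Dom_get_line_multi_ct_aggregate l_p l_c l_a → Pre_get_line_multi_ct_aggregate l_p l_c l_a → Spec_get_line_multi_ct_aggregate l_p l_c l_a (get_line_multi_ct_aggregate l_p l_c l_a)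


-- ===== LEMMAS AND PROOFS =====

-- the product as a list of triples, and a triple as A's 3-element list
def pvTrip (t : List Int × List Int × List Int) : List (List Int) := [t.1, t.2.1, t.2.2]

def pvT (l_p l_c l_a : List (List Int)) : List (List Int × List Int × List Int) :=
  l_p.flatMap (fun a => l_c.flatMap (fun b => l_a.map (fun c => (a, b, c))))

def pvG (i : Int) : List Int := PySem.List.pyGetD pvPermI i []

-- A's key of a sum_results entry
def pvKE (e : Int × Int × List Int × Int) : Int := e.2.1 - e.2.2.1.sum

-- the sum_results entry for index i and triple t
def pvMkE (p : Int × (List Int × List Int × List Int)) : Int × Int × List Int × Int :=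
  (p.1, (pvResultA (pvTrip p.2)).sum, pvG p.1, (pvG p.1).sum)

def pvS (p : Int × (List Int × List Int × List Int)) : Int := pvScoreB p.2.1 p.2.2.1 p.2.2.2 p.1

def pvStepA (b : Option (Int × Int × List Int × Int)) (p : Int × (List Int × List Int × List Int)) :
    Option (Int × Int × List Int × Int) :=
  match b with
  | none => some (pvMkE p)
  | some b' => if pvKE b' < pvKE (pvMkE p) then some (pvMkE p) else some b'

def pvStepB (b : Option (Int × List (List Int))) (p : Int × (List Int × List Int × List Int)) :
    Option (Int × List (List Int)) :=
  match b with
  | none => some (pvS p, pvTrip p.2)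
  | some (bs, bi) => if bs < pvS p then some (pvS p, pvTrip p.2) else some (bs, bi)

def pvAnn {α : Type} : List α → Int → List (Int × α)
  | [], _ => []
  | t :: ts, i => (i, t) :: pvAnn ts (i + 1)

def pvRel (perm : List (List (List Int))) :
    Option (Int × Int × List Int × Int) → Option (Int × List (List Int)) → Prop
  | none, none => True
  | some e, some bb => pvKE e = bb.1 ∧ PySem.List.pyGetD perm e.1 [] = bb.2
  | _, _ => False

theorem pvProdA_eq (l_p l_c l_a : List (List Int)) :
    pvProdA l_p l_c l_a = (pvT l_p l_c l_a).map pvTrip := by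
  simp [pvProdA, pvT, List.map_flatMap, List.map_map, Function.comp_def, pvTrip]

theorem pvT_length (l_p l_c l_a : List (List Int)) :
    (pvT l_p l_c l_a).length = l_p.length * l_c.length * l_a.length := by
  simp [pvT, List.length_flatMap]
  ring

theorem pvT_ne_nil (l_p l_c l_a : List (List Int)) (h1 : l_p ≠ []) (h2 : l_c ≠ []) (h3 : l_a ≠ []) :
    pvT l_p l_c l_a ≠ [] := by
  intro h
  have := pvT_length l_p l_c l_a
  rw [h] at this
  simp at this
  rcases this with (hq | hq) | hq
  · exact h1 hq
  · exact h2 hq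
  · exact h3 hq

theorem pvResultA_sum (a b c : List Int) :
    (pvResultA [a, b, c]).sum =
      ((PySem.Set.ofList (a ++ b ++ c)).map
        (fun x => (if x ∈ a then (1 : Int) else 0) + (if x ∈ b then 1 else 0) +
          (if x ∈ c then 1 else 0) - 1)).sum := by
  unfold pvResultA
  rw [PySem.List.foldl_append_singleton_eq_map, List.nil_append]
  have hl : List.flatMap id [a, b, c] = a ++ b ++ c := by simp
  rw [hl]
  congr 1
  apply List.map_congr_left
  intro x hx
  simp only [List.foldl_cons, List.foldl_nil]
  split_ifs <;> ring

theorem pvG_sum (i : Int) (h0 : 0 ≤ i) (h27 : i < 27) :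
    (pvG i).sum = PySem.Int.floordiv i 9 + PySem.Int.mod (PySem.Int.floordiv i 3) 3 + PySem.Int.mod i 3 := by
  interval_cases i <;> decide

theorem pvKey_eq (p : Int × (List Int × List Int × List Int)) (h0 : 0 ≤ p.1) (h27 : p.1 < 27) :
    pvKE (pvMkE p) = pvS p := by
  obtain ⟨i, a, b, c⟩ := p
  simp only [pvKE, pvMkE, pvS, pvScoreB, pvTrip] at *
  rw [pvResultA_sum, pvG_sum i h0 h27]

theorem pvHead_insertBy {α : Type} (key : α → Int) (x : α) (ys : List α) :
    (PySem.List.insertBy (fun a b => decide (key b < key a)) x ys).head? =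
      some (match ys.head? with | none => x | some h => if key h < key x then x else h) := by
  cases ys with
  | nil => simp [PySem.List.insertBy]
  | cons h t =>
    simp only [PySem.List.insertBy, List.head?_cons]
    by_cases hc : key h < key x <;> simp [hc]

theorem pvHead_sorted_rev {α : Type} (xs : List α) (key : α → Int) :
    (PySem.List.sorted xs key true).head? =
      xs.foldl (fun b x => match b with
        | none => some x
        | some b' => if key b' < key x then some x else some b') none := by
  rw [PySem.List.sorted_rev_eq_foldl_insertBy]
  have h : ∀ (l : List α) (acc : List α),
      (l.foldl (fun acc x => PySem.List.insertBy (fun a b => decide (key b < key a)) x acc) acc).head? =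
        l.foldl (fun b x => match b with
          | none => some x
          | some b' => if key b' < key x then some x else some b') acc.head? := by
    intro l
    induction l with
    | nil => intro acc; rfl
    | cons x t ih =>
      intro acc
      rw [List.foldl_cons, ih, List.foldl_cons, pvHead_insertBy]
      cases acc with
      | nil => rfl
      | cons a as =>
        by_cases hc : key a < key x <;> simp [hc]
  exact h xs []

theorem pvMemAnn {α : Type} : ∀ (ts : List α) (i0 : Int) (p : Int × α), p ∈ pvAnn ts i0 →
    ∃ (k : Nat) (hk : k < ts.length), p = (i0 + k, ts[k]) := by
  intro ts
  induction ts with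
  | nil => intro i0 p hp; simp [pvAnn] at hp
  | cons t ts ih =>
    intro i0 p hp
    rw [pvAnn] at hp
    rcases List.mem_cons.mp hp with h | h
    · exact ⟨0, by simp, by simpa using h⟩
    · obtain ⟨k, hk, hpk⟩ := ih (i0 + 1) p h
      exact ⟨k + 1, by simpa using hk, by rw [hpk]; simp; ring⟩

theorem pvAnn_ne_nil {α : Type} (ts : List α) (i0 : Int) (h : ts ≠ []) : pvAnn ts i0 ≠ [] := by
  cases ts with
  | nil => exact absurd rfl h
  | cons t ts => simp [pvAnn]

theorem pvFoldSR : ∀ (ts : List (List Int × List Int × List Int)) (i0 : Int)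
    (acc : List (Int × Int × List Int × Int)),
    ((ts.map (fun t => pvResultA (pvTrip t))).foldl
      (fun st u => (st.1 ++ [(st.2, u.sum, PySem.List.pyGetD pvPermI st.2 [],
        (PySem.List.pyGetD pvPermI st.2 []).sum)], st.2 + 1))
      (acc, i0)).1 = acc ++ (pvAnn ts i0).map pvMkE := by
  intro ts
  induction ts with
  | nil => intro i0 acc; simp [pvAnn]
  | cons t ts ih =>
    intro i0 acc
    rw [List.map_cons, List.foldl_cons, ih, pvAnn]
    simp [pvMkE, pvG]

theorem pvFoldA_some : ∀ (l : List (Int × (List Int × List Int × List Int)))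
    (e : Int × Int × List Int × Int), l.foldl pvStepA (some e) ≠ none := by
  intro l
  induction l with
  | nil => intro e h; simp at h
  | cons p l ih =>
    intro e
    rw [List.foldl_cons]
    have hs : pvStepA (some e) p = some (if pvKE e < pvKE (pvMkE p) then pvMkE p else e) := by
      by_cases hc : pvKE e < pvKE (pvMkE p) <;> simp [pvStepA, hc]
    rw [hs]
    exact ih _

theorem pvMain : ∀ (l : List (Int × (List Int × List Int × List Int)))
    (perm : List (List (List Int))),
    (∀ p ∈ l, PySem.List.pyGetD perm p.1 [] = pvTrip p.2 ∧ 0 ≤ p.1 ∧ p.1 < 27) →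
    ∀ (bA : Option (Int × Int × List Int × Int)) (bB : Option (Int × List (List Int))),
    pvRel perm bA bB → pvRel perm (l.foldl pvStepA bA) (l.foldl pvStepB bB) := by
  intro l
  induction l with
  | nil => intro perm _ bA bB hrel; simpa using hrel
  | cons p l ih =>
    intro perm H bA bB hrel
    obtain ⟨hget, h0, h27⟩ := H p (List.mem_cons_self)
    have hk := pvKey_eq p h0 h27
    rw [List.foldl_cons, List.foldl_cons]
    apply ih perm (fun q hq => H q (List.mem_cons_of_mem _ hq))
    cases bA with
    | none =>
      cases bB with
      | none => exact ⟨hk, hget⟩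
      | some bb => exact absurd hrel (by simp [pvRel])
    | some e =>
      cases bB with
      | none => exact absurd hrel (by simp [pvRel])
      | some bb =>
        obtain ⟨h1, h2⟩ := hrel
        obtain ⟨bs, bi⟩ := bb
        simp only at h1 h2
        show pvRel perm (pvStepA (some e) p) (pvStepB (some (bs, bi)) p)
        unfold pvStepA pvStepB
        simp only
        by_cases hc : pvKE e < pvKE (pvMkE p)
        · rw [if_pos hc, if_pos (by rw [← h1, ← hk]; exact hc)]
          exact ⟨hk, hget⟩
        · rw [if_neg hc, if_neg (by rw [← h1, ← hk]; exact hc)]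
          exact ⟨h1, h2⟩

-- the body of B's innermost loop, as a step over (index, triple)
def pvRawB (st : Int × Option (Int × List (List Int))) (t : List Int × List Int × List Int) :
    Int × Option (Int × List (List Int)) :=
  let score := pvScoreB t.1 t.2.1 t.2.2 st.1
  match st.2 with
  | none => (st.1 + 1, some (score, [t.1, t.2.1, t.2.2]))
  | some (bs, bi) => (st.1 + 1, if bs < score then some (score, [t.1, t.2.1, t.2.2]) else some (bs, bi))

theorem pvFoldB : ∀ (ts : List (List Int × List Int × List Int)) (i0 : Int)
    (bB : Option (Int × List (List Int))),
    ts.foldl pvRawB (i0, bB) = (i0 + ts.length, (pvAnn ts i0).foldl pvStepB bB) := by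
  intro ts
  induction ts with
  | nil => intro i0 bB; simp [pvAnn]
  | cons t ts ih =>
    intro i0 bB
    rw [List.foldl_cons, pvAnn, List.foldl_cons]
    have hstep : pvRawB (i0, bB) t = (i0 + 1, pvStepB bB (i0, t)) := by
      cases bB with
      | none => rfl
      | some bb => obtain ⟨bs, bi⟩ := bb; rfl
    rw [hstep, ih]
    simp
    ring

theorem pvB_eq (l_p l_c l_a : List (List Int)) :
    get_line_multi_ct_aggregate_alt l_p l_c l_a =
      (match (pvAnn (pvT l_p l_c l_a) 0).foldl pvStepB none with
        | some (_, item) => item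
        | none => []) := by
  have hr : ((pvT l_p l_c l_a).foldl pvRawB ((0 : Int), (none : Option (Int × List (List Int))))) =
      l_p.foldl (fun st a => l_c.foldl (fun st b =>
        l_a.foldl (fun (st : Int × Option (Int × List (List Int))) c =>
          let score := pvScoreB a b c st.1
          match st.2 with
          | none => (st.1 + 1, some (score, [a, b, c]))
          | some (bs, bi) => (st.1 + 1, if bs < score then some (score, [a, b, c]) else some (bs, bi)))
          st) st) ((0 : Int), (none : Option (Int × List (List Int)))) := by
    rw [pvT]
    simp only [List.foldl_flatMap, List.foldl_map]
    rfl
  unfold get_line_multi_ct_aggregate_alt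
  rw [← hr, pvFoldB]

theorem pvA_eq (l_p l_c l_a : List (List Int)) :
    get_line_multi_ct_aggregate l_p l_c l_a =
      PySem.List.pyGetD ((pvT l_p l_c l_a).map pvTrip)
        (PySem.List.pyGetD
          (PySem.List.sorted ((pvAnn (pvT l_p l_c l_a) 0).map pvMkE)
            (fun x => x.2.1 - x.2.2.1.sum) true) 0 ((0 : Int), (0 : Int), ([] : List Int), (0 : Int))).1 [] := by
  simp only [get_line_multi_ct_aggregate]
  rw [PySem.List.foldl_append_singleton_eq_map, List.nil_append, pvProdA_eq, List.map_map]
  simp only [Function.comp_def]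
  rw [pvFoldSR, List.nil_append]

theorem pvGetD_zero {α : Type} (x : α) (xs : List α) (d : α) :
    PySem.List.pyGetD (x :: xs) 0 d = x := by
  simp


-- ===== VERDICT (by name: the statement is the Claim_ definition above) =====
theorem get_line_multi_ct_aggregate_spec : Claim_equal_get_line_multi_ct_aggregate := by
  unfold Claim_equal_get_line_multi_ct_aggregate
  intro l_p l_c l_a hdom hpre
  obtain ⟨h1, h2, h3, h27⟩ := hpre
  unfold Spec_get_line_multi_ct_aggregate
  have hTne : pvT l_p l_c l_a ≠ [] := pvT_ne_nil _ _ _ h1 h2 h3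
  have hTlen : (pvT l_p l_c l_a).length ≤ 27 := by rw [pvT_length]; exact h27
  have H : ∀ p ∈ pvAnn (pvT l_p l_c l_a) 0,
      PySem.List.pyGetD ((pvT l_p l_c l_a).map pvTrip) p.1 [] = pvTrip p.2 ∧ 0 ≤ p.1 ∧ p.1 < 27 := by
    intro p hp
    obtain ⟨k, hk, rfl⟩ := pvMemAnn _ 0 p hp
    refine ⟨?_, by simp, by simp; omega⟩
    have hcast : ((0 : Int) + k) = ((k : Nat) : Int) := by ring
    rw [hcast, PySem.List.pyGetD_natCast]
    rw [List.getD_eq_getElem?_getD]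
    simp [hk]
  have hrel := pvMain (pvAnn (pvT l_p l_c l_a) 0) ((pvT l_p l_c l_a).map pvTrip) H none none
    (by simp [pvRel])
  cases hA : (pvAnn (pvT l_p l_c l_a) 0).foldl pvStepA none with
  | none =>
    exfalso
    cases hAnn : pvAnn (pvT l_p l_c l_a) 0 with
    | nil => exact pvAnn_ne_nil _ 0 hTne hAnn
    | cons q l =>
      rw [hAnn, List.foldl_cons] at hA
      exact pvFoldA_some l (pvMkE q) (by simpa [pvStepA] using hA)
  | some e =>
    cases hB : (pvAnn (pvT l_p l_c l_a) 0).foldl pvStepB none with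
    | none => rw [hA, hB] at hrel; exact absurd hrel (by simp [pvRel])
    | some bb =>
      rw [hA, hB] at hrel
      obtain ⟨hkey, hitem⟩ := hrel
      obtain ⟨bs, bi⟩ := bb
      rw [pvA_eq, pvB_eq, hB]
      have hhead : (PySem.List.sorted ((pvAnn (pvT l_p l_c l_a) 0).map pvMkE)
          (fun x => x.2.1 - x.2.2.1.sum) true).head? = some e := by
        rw [pvHead_sorted_rev, List.foldl_map]
        refine Eq.trans ?_ hA
        apply PySem.List.foldl_congr_mem
        intro acc x hx
        cases acc <;> rfl
      cases hs : PySem.List.sorted ((pvAnn (pvT l_p l_c l_a) 0).map pvMkE)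
          (fun x => x.2.1 - x.2.2.1.sum) true with
      | nil => rw [hs] at hhead; simp at hhead
      | cons m t' =>
        rw [hs] at hhead
        simp only [List.head?_cons, Option.some.injEq] at hhead
        rw [pvGetD_zero, hhead]
        exact hitem
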